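-- pv_equiv track=rewrite | github.com/deadln/multiple-sitl | field_flyover.py | split_points
-- ===== SOURCE A (Python) =====
-- def split_points(points, n):
--     res = []
--     split_size = len(points) // n
--     mod = len(points) % n
--     split_sizes = []
--     for i in range(n):
--         split_sizes.append(split_size)
--         if mod > 0:
--             split_sizes[i] += 1
--             mod -= 1
--     i = 0
--     for split in range(len(split_sizes)):
--         if split < len(split_sizes) - 1:
--             res.append(points[i:i + split_sizes[split] + 1])
--         else:
--             res.append(points[i:i + split_sizes[split]])
--         i += split_sizes[split]
--     return res
-- ===== SOURCE B (Python) =====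
-- def split_points(points, n):
--     base = len(points) // n
--     mod = len(points) % n
--     res = []
--     for j in range(n):
--         start = j * base + min(j, mod)
--         size = base + (1 if j < mod else 0)
--         end = start + size + (1 if j < n - 1 else 0)
--         res.append(points[start:end])
--     return res
-- ===== Notes on version B (the rewrite author's own statement) =====
-- stated objective: simpler
-- what changed: Replaced A's two-pass structure (build a split_sizes list, then walk it with an accumulated start index) by a single loop that computes each chunk's start in closed form as j*base + min(j, mod) and its size as base + (1 if j < mod else 0).
import Mathlib
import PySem

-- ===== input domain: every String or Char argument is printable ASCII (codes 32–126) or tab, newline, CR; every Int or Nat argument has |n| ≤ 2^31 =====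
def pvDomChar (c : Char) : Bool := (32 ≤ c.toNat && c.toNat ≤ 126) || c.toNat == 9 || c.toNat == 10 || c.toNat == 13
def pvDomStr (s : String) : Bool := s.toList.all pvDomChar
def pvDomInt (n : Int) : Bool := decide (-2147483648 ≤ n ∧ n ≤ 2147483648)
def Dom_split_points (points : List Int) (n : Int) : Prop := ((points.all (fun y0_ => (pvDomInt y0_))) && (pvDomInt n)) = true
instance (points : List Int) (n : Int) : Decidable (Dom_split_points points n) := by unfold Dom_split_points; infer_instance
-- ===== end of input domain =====

-- B replaces A's build-sizes-then-accumulate two-pass structure by one loop whose chunk start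
-- is the closed form j*base + min j mod (objective: simpler).


-- ===== PORT A =====
def split_points (points : List Int) (n : Int) : List (List Int) :=
  let split_size : Int := PySem.Int.floordiv (points.length : Int) n
  let md : Int := PySem.Int.mod (points.length : Int) n
  let st1 : List Int × Int :=
    (PySem.List.pyRange 0 n).foldl
      (fun (st : List Int × Int) (i : Int) =>
        let sizes := st.1 ++ [split_size]
        if st.2 > 0 then (sizes.set i.toNat (split_size + 1), st.2 - 1) else (sizes, st.2))
      ([], md)
  let split_sizes := st1.1
  let st2 : List (List Int) × Int :=
    (PySem.List.pyRange 0 (split_sizes.length : Int)).foldl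
      (fun (st : List (List Int) × Int) (split : Int) =>
        let sz := PySem.List.pyGetD split_sizes split 0
        if split < (split_sizes.length : Int) - 1 then
          (st.1 ++ [PySem.List.slice points (some st.2) (some (st.2 + sz + 1))], st.2 + sz)
        else
          (st.1 ++ [PySem.List.slice points (some st.2) (some (st.2 + sz))], st.2 + sz))
      ([], 0)
  st2.1

-- ===== PORT B =====
def split_points_alt (points : List Int) (n : Int) : List (List Int) :=
  let base : Int := PySem.Int.floordiv (points.length : Int) n
  let md : Int := PySem.Int.mod (points.length : Int) n
  (PySem.List.pyRange 0 n).foldl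
    (fun (res : List (List Int)) (j : Int) =>
      let start := j * base + min j md
      let size := base + (if j < md then 1 else 0)
      let e := start + size + (if j < n - 1 then 1 else 0)
      res ++ [PySem.List.slice points (some start) (some e)])
    []

-- ===== PRECONDITION & SPEC =====
-- Pre_ excludes exactly n = 0, where Python A raises ZeroDivisionError.
def Pre_split_points (points : List Int) (n : Int) : Prop := n ≠ 0
instance (points : List Int) (n : Int) : Decidable (Pre_split_points points n) := by unfold Pre_split_points; infer_instance
def pvWitness_split_points : List Int × Int := ([1, 2, 3, 4, 5], 2)

def Spec_split_points (points : List Int) (n : Int) (out : List (List Int)) : Prop := out = split_points_alt points n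
instance (points : List Int) (n : Int) (out : List (List Int)) : Decidable (Spec_split_points points n out) := by unfold Spec_split_points; infer_instance

-- ===== CLAIM (what is proved, stated in full; the proofs are below) =====
def Claim_equal_split_points : Prop := ∀ (points : List Int) (n : Int), Dom_split_points points n → Pre_split_points points n → Spec_split_points points n (split_points points n)

-- ===== LEMMAS AND PROOFS =====

theorem set_append_last {α : Type} (l : List α) (x y : α) :
    (l ++ [x]).set l.length y = l ++ [y] := by
  induction l with
  | nil => rfl
  | cons a t ih => simp [ih]

-- first loop of A: the sizes list in closed form
theorem sizes_fold (ss md : Int) (hmd : 0 ≤ md) (k : Nat) :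
    (PySem.List.pyRange 0 k).foldl
      (fun (st : List Int × Int) (i : Int) =>
        if st.2 > 0 then ((st.1 ++ [ss]).set i.toNat (ss + 1), st.2 - 1) else (st.1 ++ [ss], st.2))
      ([], md)
    = ((PySem.List.pyRange 0 k).map (fun i => ss + if i < md then 1 else 0),
       md - min (k : Int) md) := by
  induction k with
  | zero => simp [PySem.List.pyRange_one_eq_nil (le_refl (0 : Int)), hmd]
  | succ k ih =>
    have hk : (0 : Int) ≤ (k : Int) := by positivity
    have hr : PySem.List.pyRange 0 ((k : Int) + 1) = PySem.List.pyRange 0 (k : Int) ++ [(k : Int)] :=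
      PySem.List.pyRange_one_succ_right hk
    have hcast : ((k + 1 : Nat) : Int) = (k : Int) + 1 := by push_cast; ring
    rw [hcast, hr, List.foldl_append, List.map_append, ih]
    have hlen : ((PySem.List.pyRange 0 (k : Int)).map (fun i => ss + if i < md then 1 else 0)).length = k := by
      simp [PySem.List.length_pyRange_one]
    by_cases h : (k : Int) < md
    · have hpos : md - min (k : Int) md > 0 := by omega
      have hset := set_append_last ((PySem.List.pyRange 0 (k : Int)).map (fun i => ss + if i < md then 1 else 0)) ss (ss + 1)
      rw [hlen] at hset
      simp only [List.foldl_cons, List.foldl_nil, if_pos hpos, Int.toNat_natCast, hset, Prod.mk.injEq]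
      constructor
      · simp [h]
      · omega
    · have hpos : ¬ (md - min (k : Int) md > 0) := by omega
      simp only [List.foldl_cons, List.foldl_nil, if_neg hpos, Prod.mk.injEq]
      constructor
      · simp [h]
      · omega

-- second loop of A versus B's single loop, prefix by prefix
theorem main_fold (points : List Int) (n : Int) (hn : 0 < n) (k : Nat) (hk : (k : Int) ≤ n) :
    (PySem.List.pyRange 0 (k : Int)).foldl
      (fun (st : List (List Int) × Int) (split : Int) =>
        if split < ((((PySem.List.pyRange 0 n).map
              (fun i => PySem.Int.floordiv (points.length : Int) n +
                if i < PySem.Int.mod (points.length : Int) n then 1 else 0)).length : Nat) : Int) - 1 then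
          (st.1 ++ [PySem.List.slice points (some st.2)
              (some (st.2 + PySem.List.pyGetD ((PySem.List.pyRange 0 n).map
                (fun i => PySem.Int.floordiv (points.length : Int) n +
                  if i < PySem.Int.mod (points.length : Int) n then 1 else 0)) split 0 + 1))],
            st.2 + PySem.List.pyGetD ((PySem.List.pyRange 0 n).map
              (fun i => PySem.Int.floordiv (points.length : Int) n +
                if i < PySem.Int.mod (points.length : Int) n then 1 else 0)) split 0)
        else
          (st.1 ++ [PySem.List.slice points (some st.2)
              (some (st.2 + PySem.List.pyGetD ((PySem.List.pyRange 0 n).map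
                (fun i => PySem.Int.floordiv (points.length : Int) n +
                  if i < PySem.Int.mod (points.length : Int) n then 1 else 0)) split 0))],
            st.2 + PySem.List.pyGetD ((PySem.List.pyRange 0 n).map
              (fun i => PySem.Int.floordiv (points.length : Int) n +
                if i < PySem.Int.mod (points.length : Int) n then 1 else 0)) split 0))
      ([], 0)
    = ((PySem.List.pyRange 0 (k : Int)).foldl
        (fun (res : List (List Int)) (j : Int) =>
          res ++ [PySem.List.slice points
            (some (j * PySem.Int.floordiv (points.length : Int) n +
               min j (PySem.Int.mod (points.length : Int) n)))
            (some (j * PySem.Int.floordiv (points.length : Int) n +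
               min j (PySem.Int.mod (points.length : Int) n) +
               (PySem.Int.floordiv (points.length : Int) n +
                 (if j < PySem.Int.mod (points.length : Int) n then 1 else 0)) +
               (if j < n - 1 then 1 else 0)))])
        [],
       (k : Int) * PySem.Int.floordiv (points.length : Int) n +
         min (k : Int) (PySem.Int.mod (points.length : Int) n)) := by
  induction k with
  | zero =>
    have hmd : 0 ≤ PySem.Int.mod (points.length : Int) n := PySem.Int.mod_nonneg _ hn
    have h0 : PySem.List.pyRange 0 (((0:Nat):Int)) = [] := PySem.List.pyRange_one_eq_nil (by norm_num)
    rw [h0]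
    simp
    omega
  | succ k ih =>
    have hk' : (k : Int) ≤ n := by push_cast at hk; omega
    have hcast : ((k + 1 : Nat) : Int) = (k : Int) + 1 := by push_cast; ring
    have hr : PySem.List.pyRange 0 ((k : Int) + 1) = PySem.List.pyRange 0 (k : Int) ++ [(k : Int)] :=
      PySem.List.pyRange_one_succ_right (by positivity)
    rw [hcast, hr, List.foldl_append, List.foldl_append, ih hk']
    set ss := PySem.Int.floordiv (points.length : Int) n with hss
    set md := PySem.Int.mod (points.length : Int) n with hmd'
    have hmd0 : 0 ≤ md := PySem.Int.mod_nonneg _ hn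
    have hmdlt : md < n := PySem.Int.mod_lt _ hn
    have hlen : ((PySem.List.pyRange 0 n).map (fun i => ss + if i < md then 1 else 0)).length = n.toNat := by
      simp [PySem.List.length_pyRange_one]
    have hkn : k < ((PySem.List.pyRange 0 n).map (fun i => ss + if i < md then 1 else 0)).length := by
      rw [hlen]; omega
    have hget : PySem.List.pyGetD ((PySem.List.pyRange 0 n).map (fun i => ss + if i < md then 1 else 0)) ((k : Nat) : Int) 0
        = ss + if (k : Int) < md then 1 else 0 := by
      rw [PySem.List.pyGetD_natCast, List.getD_eq_getElem ((PySem.List.pyRange 0 n).map _) 0 hkn]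
      simp [PySem.List.getElem_pyRange_one]
    have hmin : min ((k : Int) + 1) md = min (k : Int) md + (if (k : Int) < md then 1 else 0) := by
      split_ifs <;> omega
    simp only [List.foldl_cons, List.foldl_nil, hget, hlen, Int.toNat_of_nonneg hn.le]
    by_cases hlast : (k : Int) < n - 1
    · rw [if_pos hlast, if_pos hlast]
      simp only [Prod.mk.injEq]
      refine ⟨by simp, ?_⟩
      rw [hmin]; split_ifs <;> ring
    · rw [if_neg hlast, if_neg hlast]
      simp only [Prod.mk.injEq]
      refine ⟨by simp, ?_⟩
      rw [hmin]; split_ifs <;> ring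

-- ===== VERDICT (by name: the statement is the Claim_ definition above) =====
theorem split_points_spec : Claim_equal_split_points := by
  intro points n _ hn
  simp only [Spec_split_points, split_points, split_points_alt]
  rcases lt_or_gt_of_ne hn with hneg | hpos
  · have h0 : PySem.List.pyRange 0 n = [] := PySem.List.pyRange_one_eq_nil hneg.le
    rw [h0]
    simp [PySem.List.pyRange_one_eq_nil (le_refl (0 : Int))]
  · have hcn : ((n.toNat : Nat) : Int) = n := Int.toNat_of_nonneg hpos.le
    have hmd0 : 0 ≤ PySem.Int.mod (points.length : Int) n := PySem.Int.mod_nonneg _ hpos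
    have h1 := sizes_fold (PySem.Int.floordiv (points.length : Int) n)
      (PySem.Int.mod (points.length : Int) n) hmd0 n.toNat
    rw [hcn] at h1
    have hlen2 : ((PySem.List.pyRange 0 n).map
        (fun i => PySem.Int.floordiv (points.length : Int) n +
          if i < PySem.Int.mod (points.length : Int) n then 1 else 0)).length = n.toNat := by
      simp [PySem.List.length_pyRange_one]
    have h2 := main_fold points n hpos n.toNat (le_of_eq hcn)
    rw [hlen2] at h2
    rw [hcn] at h2
    rw [h1, hlen2, hcn, h2]
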